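-- pv_equiv track=rewrite | github.com/jjongwa/Algorithm-Practice | 1021-4.py | is_pellin
-- ===== SOURCE A (Python) =====
-- def is_pellin(word):
--     for i in range(len(word)-1):
--         if word[i] == word[i+1]:
--             return 1
--     for i in range(1,len(word)-1):
--         if word[i-1] == word[i+1]:
--             return 1
--     return 0
-- ===== SOURCE B (Python) =====
-- def is_pellin(word):
--     for i in range(len(word) - 1):
--         window = word[i:i + 3]
--         if len(set(window)) < len(window):
--             return 1
--     return 0
-- ===== Notes on version B (the rewrite author's own statement) =====
-- stated objective: alternative
-- what changed: Replaces A's two staged pairwise-comparison loops (adjacent pairs, then skip-one pairs) by one sliding-window scan that slices word[i:i+3] and detects a duplicate in each window by comparing len(set(window)) with len(window).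
import Mathlib
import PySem

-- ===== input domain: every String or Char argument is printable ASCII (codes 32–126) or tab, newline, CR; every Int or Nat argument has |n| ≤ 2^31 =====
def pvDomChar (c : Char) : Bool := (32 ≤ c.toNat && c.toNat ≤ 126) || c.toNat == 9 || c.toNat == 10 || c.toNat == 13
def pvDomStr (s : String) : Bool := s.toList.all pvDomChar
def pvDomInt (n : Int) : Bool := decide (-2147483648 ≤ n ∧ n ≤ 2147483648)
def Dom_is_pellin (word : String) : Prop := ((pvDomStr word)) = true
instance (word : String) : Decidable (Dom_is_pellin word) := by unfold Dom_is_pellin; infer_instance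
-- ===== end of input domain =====

-- B replaces A's two staged pairwise-comparison loops by one sliding-window scan that
-- detects a duplicate in each 3-character window via set cardinality (alternative; same cost).

-- ===== PORT A =====
-- first loop: for i in range(len(word)-1): if word[i] == word[i+1]: return 1
def pvLoop1 (cs : List Char) : List Int → Option Int
  | [] => none
  | i :: rest =>
      if PySem.List.pyGet? cs i == PySem.List.pyGet? cs (i + 1) then some 1
      else pvLoop1 cs rest

-- second loop: for i in range(1, len(word)-1): if word[i-1] == word[i+1]: return 1
def pvLoop2 (cs : List Char) : List Int → Option Int
  | [] => none
  | i :: rest =>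
      if PySem.List.pyGet? cs (i - 1) == PySem.List.pyGet? cs (i + 1) then some 1
      else pvLoop2 cs rest

def is_pellin (word : String) : Int :=
  let cs := word.toList
  match pvLoop1 cs (PySem.List.pyRange 0 ((cs.length : Int) - 1) 1) with
  | some r => r
  | none =>
    match pvLoop2 cs (PySem.List.pyRange 1 ((cs.length : Int) - 1) 1) with
    | some r => r
    | none => 0

-- ===== PORT B =====
-- len(set(window)) < len(window)
def pvHasDup (w : List Char) : Bool := PySem.Set.len (PySem.Set.ofList w) < (w.length : Int)

-- for i in range(len(word)-1): window = word[i:i+3]; if len(set(window)) < len(window): return 1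
def pvLoopB (cs : List Char) : List Int → Int
  | [] => 0
  | i :: rest =>
      if pvHasDup (PySem.List.slice cs (some i) (some (i + 3))) then 1
      else pvLoopB cs rest

def is_pellin_alt (word : String) : Int :=
  let cs := word.toList
  pvLoopB cs (PySem.List.pyRange 0 ((cs.length : Int) - 1) 1)

-- ===== PRECONDITION & SPEC =====
def Spec_is_pellin (word : String) (out : Int) : Prop := out = is_pellin_alt word
instance (word : String) (out : Int) : Decidable (Spec_is_pellin word out) := by unfold Spec_is_pellin; infer_instance

-- ===== CLAIM (what is proved, stated in full; the proofs are below) =====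
def Claim_equal_is_pellin : Prop := ∀ (word : String), Dom_is_pellin word → Spec_is_pellin word (is_pellin word)

-- ===== LEMMAS AND PROOFS =====

theorem pvLoop1_eq_any (cs : List Char) (l : List Int) :
    pvLoop1 cs l =
      (if l.any (fun i => PySem.List.pyGet? cs i == PySem.List.pyGet? cs (i + 1)) then some 1 else none) := by
  induction l with
  | nil => simp [pvLoop1]
  | cons i rest ih =>
      simp only [pvLoop1, List.any_cons, ih]
      by_cases h : (PySem.List.pyGet? cs i == PySem.List.pyGet? cs (i + 1)) = true <;> simp [h]

theorem pvLoop2_eq_any (cs : List Char) (l : List Int) :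
    pvLoop2 cs l =
      (if l.any (fun i => PySem.List.pyGet? cs (i - 1) == PySem.List.pyGet? cs (i + 1)) then some 1 else none) := by
  induction l with
  | nil => simp [pvLoop2]
  | cons i rest ih =>
      simp only [pvLoop2, List.any_cons, ih]
      by_cases h : (PySem.List.pyGet? cs (i - 1) == PySem.List.pyGet? cs (i + 1)) = true <;> simp [h]

theorem pvLoopB_eq_any (cs : List Char) (l : List Int) :
    pvLoopB cs l =
      (if l.any (fun i => pvHasDup (PySem.List.slice cs (some i) (some (i + 3)))) then 1 else 0) := by
  induction l with
  | nil => simp [pvLoopB]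
  | cons i rest ih =>
      simp only [pvLoopB, List.any_cons, ih]
      by_cases h : pvHasDup (PySem.List.slice cs (some i) (some (i + 3))) = true <;> simp [h]

theorem rangeA1_iff (cs : List Char) :
    ((PySem.List.pyRange 0 ((cs.length : Int) - 1) 1).any
        (fun i => PySem.List.pyGet? cs i == PySem.List.pyGet? cs (i + 1)) = true) ↔
      ∃ k, k + 1 < cs.length ∧ cs[k]? = cs[k + 1]? := by
  rw [List.any_eq_true]
  constructor
  · rintro ⟨i, hmem, h⟩
    rw [PySem.List.mem_pyRange_one] at hmem
    obtain ⟨h0, h1⟩ := hmem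
    refine ⟨i.toNat, by omega, ?_⟩
    have e1 : PySem.List.pyGet? cs i = cs[i.toNat]? := PySem.List.pyGet?_of_nonneg cs h0
    have e2 : PySem.List.pyGet? cs (i + 1) = cs[i.toNat + 1]? := by
      rw [PySem.List.pyGet?_of_nonneg cs (show (0:Int) ≤ i + 1 by omega)]
      congr 1; omega
    simpa [e1, e2] using h
  · rintro ⟨k, hk, heq⟩
    refine ⟨(k : Int), ?_, ?_⟩
    · rw [PySem.List.mem_pyRange_one]
      constructor <;> [omega; (push_cast; omega)]
    · have e2 : ((k : Int) + 1) = ((k + 1 : Nat) : Int) := by push_cast; ring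
      rw [e2, PySem.List.pyGet?_natCast, PySem.List.pyGet?_natCast]
      simp [heq]

theorem rangeA2_iff (cs : List Char) :
    ((PySem.List.pyRange 1 ((cs.length : Int) - 1) 1).any
        (fun i => PySem.List.pyGet? cs (i - 1) == PySem.List.pyGet? cs (i + 1)) = true) ↔
      ∃ k, k + 2 < cs.length ∧ cs[k]? = cs[k + 2]? := by
  rw [List.any_eq_true]
  constructor
  · rintro ⟨i, hmem, h⟩
    rw [PySem.List.mem_pyRange_one] at hmem
    obtain ⟨h0, h1⟩ := hmem
    refine ⟨(i - 1).toNat, by omega, ?_⟩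
    have e1 : PySem.List.pyGet? cs (i - 1) = cs[(i - 1).toNat]? :=
      PySem.List.pyGet?_of_nonneg cs (by omega)
    have e2 : PySem.List.pyGet? cs (i + 1) = cs[(i - 1).toNat + 2]? := by
      rw [PySem.List.pyGet?_of_nonneg cs (show (0:Int) ≤ i + 1 by omega)]
      congr 1; omega
    simpa [e1, e2] using h
  · rintro ⟨k, hk, heq⟩
    refine ⟨(k : Int) + 1, ?_, ?_⟩
    · rw [PySem.List.mem_pyRange_one]
      constructor <;> [omega; (push_cast; omega)]
    · have e1 : ((k : Int) + 1 - 1) = ((k : Nat) : Int) := by ring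
      have e2 : ((k : Int) + 1 + 1) = ((k + 2 : Nat) : Int) := by push_cast; ring
      rw [e1, e2, PySem.List.pyGet?_natCast, PySem.List.pyGet?_natCast]
      simp [heq]

-- a window of length ≤ 3 has a duplicate iff one of the three candidate pairs is equal
theorem window_dup_iff (cs : List Char) (k : Nat) (hk : k + 1 < cs.length) :
    (pvHasDup ((cs.drop k).take 3) = true) ↔
      (cs[k]? = cs[k + 1]? ∨
        (k + 2 < cs.length ∧ (cs[k]? = cs[k + 2]? ∨ cs[k + 1]? = cs[k + 2]?))) := by
  have hlen : 2 ≤ (cs.drop k).length := by simp; omega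
  obtain ⟨a, d1, h1⟩ : ∃ a d1, cs.drop k = a :: d1 := by
    cases h : cs.drop k with
    | nil => rw [h] at hlen; simp at hlen
    | cons a d1 => exact ⟨a, d1, rfl⟩
  obtain ⟨b, t, h2⟩ : ∃ b t, d1 = b :: t := by
    cases h : d1 with
    | nil => rw [h1, h] at hlen; simp at hlen
    | cons b t => exact ⟨b, t, rfl⟩
  subst h2
  have e0 : cs[k]? = some a := by
    have h := (List.getElem?_drop : (List.drop k cs)[0]? = cs[k+0]?)
    rw [h1] at h; simpa using h.symm
  have e1 : cs[k + 1]? = some b := by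
    have h := (List.getElem?_drop : (List.drop k cs)[1]? = cs[k+1]?)
    rw [h1] at h; simpa using h.symm
  have e2 : cs[k + 2]? = t[0]? := by
    have h := (List.getElem?_drop : (List.drop k cs)[2]? = cs[k+2]?)
    rw [h1] at h; simpa using h.symm
  have hlcs : (cs.drop k).length = cs.length - k := by simp
  cases t with
  | nil =>
      have hk2 : ¬ k + 2 < cs.length := by rw [h1] at hlcs; simp at hlcs; omega
      rw [h1]
      constructor
      · intro h
        have hab : a = b := by
          by_contra hab
          simp [pvHasDup, PySem.Set.ofList, PySem.Set.add, PySem.Set.len,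
            PySem.Set.contains, hab, eq_comm] at h
        exact Or.inl (by rw [e0, e1, hab])
      · intro h
        rcases h with h | ⟨h2', _⟩
        · rw [e0, e1] at h
          have hab : a = b := by simpa using h
          simp [pvHasDup, PySem.Set.ofList, PySem.Set.add, PySem.Set.len,
            PySem.Set.contains, hab]
        · exact absurd h2' hk2
  | cons c t' =>
      have hk2 : k + 2 < cs.length := by rw [h1] at hlcs; simp at hlcs; omega
      rw [h1]
      simp only [List.take, e0, e1, e2, hk2, true_and, List.getElem?_cons_zero,
        Option.some.injEq]
      by_cases hab : a = b <;> by_cases hac : a = c <;> by_cases hbc : b = c <;>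
        simp_all [pvHasDup, PySem.Set.ofList, PySem.Set.add, PySem.Set.len,
          PySem.Set.contains, eq_comm]

theorem rangeB_iff (cs : List Char) :
    ((PySem.List.pyRange 0 ((cs.length : Int) - 1) 1).any
        (fun i => pvHasDup (PySem.List.slice cs (some i) (some (i + 3)))) = true) ↔
      ((∃ k, k + 1 < cs.length ∧ cs[k]? = cs[k + 1]?) ∨
       (∃ k, k + 2 < cs.length ∧ cs[k]? = cs[k + 2]?)) := by
  rw [List.any_eq_true]
  constructor
  · rintro ⟨i, hmem, h⟩
    rw [PySem.List.mem_pyRange_one] at hmem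
    obtain ⟨h0, h1⟩ := hmem
    set k := i.toNat with hkdef
    have hik : i = (k : Int) := by omega
    have hsl : PySem.List.slice cs (some i) (some (i + 3)) = (cs.drop k).take 3 := by
      rw [hik, show ((k : Int) + 3) = ((k : Int) + ((3 : Nat) : Int)) by push_cast; ring]
      exact PySem.List.slice_natCast_add cs k 3
    rw [hsl, window_dup_iff cs k (by omega)] at h
    rcases h with h | ⟨hk2, h | h⟩
    · exact Or.inl ⟨k, by omega, h⟩
    · exact Or.inr ⟨k, hk2, h⟩
    · exact Or.inl ⟨k + 1, by omega, h⟩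
  · intro h
    have hpick : ∃ k, k + 1 < cs.length ∧
        (cs[k]? = cs[k + 1]? ∨
          (k + 2 < cs.length ∧ (cs[k]? = cs[k + 2]? ∨ cs[k + 1]? = cs[k + 2]?))) := by
      rcases h with ⟨k, hk, heq⟩ | ⟨k, hk, heq⟩
      · exact ⟨k, hk, Or.inl heq⟩
      · exact ⟨k, by omega, Or.inr ⟨hk, Or.inl heq⟩⟩
    obtain ⟨k, hk, hcond⟩ := hpick
    refine ⟨(k : Int), ?_, ?_⟩
    · rw [PySem.List.mem_pyRange_one]
      constructor <;> [omega; (push_cast; omega)]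
    · have hsl : PySem.List.slice cs (some (k : Int)) (some ((k : Int) + 3)) = (cs.drop k).take 3 := by
        rw [show ((k : Int) + 3) = ((k : Int) + ((3 : Nat) : Int)) by push_cast; ring]
        exact PySem.List.slice_natCast_add cs k 3
      rw [hsl, window_dup_iff cs k hk]
      exact hcond

theorem pv_ne_true {b : Bool} (h : b = false) : ¬ b = true := by simp [h]

-- ===== VERDICT (by name: the statement is the Claim_ definition above) =====
theorem is_pellin_spec : Claim_equal_is_pellin := by
  intro word _
  unfold Spec_is_pellin is_pellin is_pellin_alt
  simp only [pvLoop1_eq_any, pvLoop2_eq_any, pvLoopB_eq_any]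
  cases hA1 : (PySem.List.pyRange 0 ((word.toList.length : Int) - 1) 1).any
      (fun i => PySem.List.pyGet? word.toList i == PySem.List.pyGet? word.toList (i + 1)) <;>
  cases hA2 : (PySem.List.pyRange 1 ((word.toList.length : Int) - 1) 1).any
      (fun i => PySem.List.pyGet? word.toList (i - 1) == PySem.List.pyGet? word.toList (i + 1)) <;>
  cases hB : (PySem.List.pyRange 0 ((word.toList.length : Int) - 1) 1).any
      (fun i => pvHasDup (PySem.List.slice word.toList (some i) (some (i + 3))))
  · simp
  · -- A found nothing, B found a duplicate: impossible
    rcases (rangeB_iff word.toList).mp hB with h | h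
    · exact absurd ((rangeA1_iff word.toList).mpr h) (pv_ne_true hA1)
    · exact absurd ((rangeA2_iff word.toList).mpr h) (pv_ne_true hA2)
  · -- A's second loop fired, B found nothing: impossible
    exact absurd ((rangeB_iff word.toList).mpr
      (Or.inr ((rangeA2_iff word.toList).mp hA2))) (pv_ne_true hB)
  · simp
  · -- A's first loop fired, B found nothing: impossible
    exact absurd ((rangeB_iff word.toList).mpr
      (Or.inl ((rangeA1_iff word.toList).mp hA1))) (pv_ne_true hB)
  · simp
  · exact absurd ((rangeB_iff word.toList).mpr
      (Or.inl ((rangeA1_iff word.toList).mp hA1))) (pv_ne_true hB)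
  · simp
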